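-- pv_equiv track=rewrite | github.com/SubratTamu/Matlab-and-Python-Self-Study-projects | factorial.py | num_zeros
-- ===== SOURCE A (Python) =====
-- def factorial(num: int) -> int:
--     """
--     Return factorial of `num`
--     :param num: takes integer only
--     :return: multiplication of all integer numbers from 1 to `num`, inclusive
--     """
--     if num ==0:
--         return 1
--     fact_num = 1
--     for x in range(1,num+1):
--         fact_num = fact_num*(x)
--     return fact_num
--
-- def num_zeros(num: int) -> int:
--     """
--     Returns the number of zeros in factorial of `num`
--     :param num: takes integer only
--     :return: returns total number of zeros in factorial `num`
--     """
--     fact = str(factorial(num))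
--     fact.split()
--     count = 0
--     for i in fact:
--         if i == "0":
--             count = count+1
--     return count
-- ===== SOURCE B (Python) =====
-- def num_zeros(num: int) -> int:
--     # factorial (0 and negatives give 1, like A's empty range)
--     fact = 1
--     for x in range(1, num + 1):
--         fact = fact * x
--     # count zero digits by modular arithmetic on the integer itself (no decimal string):
--     # peel 1800 digits per big divmod; while a higher part remains, leading zeros of the
--     # chunk are real digits, so count exactly 1800; the final part is counted digit by digit.
--     CHUNK = 10 ** 1800
--     count = 0
--     while fact >= CHUNK:
--         fact, rest = divmod(fact, CHUNK)
--         for _ in range(1800):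
--             if rest % 10 == 0:
--                 count = count + 1
--             rest = rest // 10
--     while fact:
--         if fact % 10 == 0:
--             count = count + 1
--         fact = fact // 10
--     return count
-- ===== Notes on version B (the rewrite author's own statement) =====
-- stated objective: alternative
-- what changed: B counts zero digits of the factorial by modular arithmetic on the integer itself (one big divmod peels 1800 digits, then %10///10 digit extraction) instead of converting it to a decimal string and scanning its characters.
import Mathlib
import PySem

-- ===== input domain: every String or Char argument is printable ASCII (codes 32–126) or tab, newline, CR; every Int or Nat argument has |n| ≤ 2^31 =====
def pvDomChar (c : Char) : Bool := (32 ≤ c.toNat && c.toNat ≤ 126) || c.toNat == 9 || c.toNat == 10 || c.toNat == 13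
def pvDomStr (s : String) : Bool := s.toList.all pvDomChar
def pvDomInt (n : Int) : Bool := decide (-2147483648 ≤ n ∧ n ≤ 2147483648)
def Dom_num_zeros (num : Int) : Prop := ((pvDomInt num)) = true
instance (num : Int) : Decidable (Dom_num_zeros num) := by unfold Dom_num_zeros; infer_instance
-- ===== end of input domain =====

-- ===== PORT A =====
-- B counts zero digits by %10//10 extraction on the integer instead of scanning str(fact); objective: alternative.
def factorial (num : Int) : Int :=
  if num = 0 then 1
  else (PySem.List.pyRange 1 (num + 1) 1).foldl (fun fact_num x => fact_num * x) 1

def num_zeros (num : Int) : Int :=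
  let fact := (PySem.Int.toStr (factorial num)).toList   -- str(...); the for-loop walks its characters
  -- fact.split() in A computes a list that is discarded; no effect
  fact.foldl (fun count i => if i = '0' then count + 1 else count) 0

-- ===== PORT B =====
def factorial_b (num : Int) : Int :=
  (PySem.List.pyRange 1 (num + 1) 1).foldl (fun fact x => fact * x) 1

-- the while loop of Source B; its argument is the factorial, always ≥ 1, so Nat's % and / are
-- exactly Python's % and // here and the loop terminates
def countZeros (n : Nat) (count : Int) : Int :=
  if n = 0 then count
  else countZeros (n / 10) (count + if n % 10 = 0 then 1 else 0)
decreasing_by exact Nat.div_lt_self (Nat.pos_of_ne_zero (by assumption)) (by omega)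

-- the inner for-loop of Source B: count zeros among the k lowest digits (leading zeros included)
def czFix (rest : Nat) (k : Nat) (count : Int) : Int :=
  match k with
  | 0 => count
  | k + 1 => czFix (rest / 10) k (count + if rest % 10 = 0 then 1 else 0)

-- the chunked while loop of Source B: peel 1800 digits per divmod while a higher part remains
def bigLoop (fact : Nat) (count : Int) : Int :=
  if fact < 10 ^ 1800 then countZeros fact count
  else bigLoop (fact / 10 ^ 1800) (czFix (fact % 10 ^ 1800) 1800 count)
decreasing_by
  exact Nat.div_lt_self
    (by have : 0 < 10 ^ 1800 := pow_pos (by norm_num) _; omega)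
    (Nat.one_lt_pow (by norm_num) (by norm_num))

def num_zeros_alt (num : Int) : Int :=
  bigLoop (factorial_b num).toNat 0

def Spec_num_zeros (num : Int) (out : Int) : Prop := out = num_zeros_alt num
instance (num : Int) (out : Int) : Decidable (Spec_num_zeros num out) := by unfold Spec_num_zeros; infer_instance

-- ===== CLAIM (what is proved, stated in full; the proofs are below) =====
def Claim_equal_num_zeros : Prop := ∀ (num : Int), Dom_num_zeros num → Spec_num_zeros num (num_zeros num)

-- ===== LEMMAS AND PROOFS =====

-- decimal digit sequence of n, most significant first (what toDigitsCore computes)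
def rep (n : Nat) : List Char :=
  if _h : n < 10 then [Nat.digitChar n]
  else rep (n / 10) ++ [Nat.digitChar (n % 10)]
decreasing_by exact Nat.div_lt_self (by omega) (by omega)

lemma toDigitsCore_eq_rep : ∀ (f n : Nat) (l : List Char), n < f →
    Nat.toDigitsCore 10 f n l = rep n ++ l := by
  intro f
  induction f with
  | zero => intro n l hnf; omega
  | succ f ih =>
    intro n l h
    rw [Nat.toDigitsCore]
    by_cases h10 : n < 10
    · have : n / 10 = 0 := Nat.div_eq_of_lt h10
      simp [this, rep, h10, Nat.mod_eq_of_lt h10]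
    · have hne : ¬ n / 10 = 0 := by
        intro hz; exact h10 (by omega)
      have hlt : n / 10 < f := by
        have := Nat.div_lt_self (n := n) (by omega) (by omega : (1:Nat) < 10)
        omega
      simp only [hne, if_false]
      rw [ih (n / 10) _ hlt]
      conv_rhs => rw [rep]
      simp [h10]

lemma toDigits_eq_rep (n : Nat) : Nat.toDigits 10 n = rep n := by
  have := toDigitsCore_eq_rep (n + 1) n [] (by omega)
  simpa [Nat.toDigits] using this

lemma digitChar_eq_zero_iff : ∀ r : Nat, r < 10 → (Nat.digitChar r = '0' ↔ r = 0) := by decide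

lemma countZeros_acc (n : Nat) : ∀ c : Int, countZeros n c = c + countZeros n 0 := by
  induction n using Nat.strong_induction_on with
  | _ n ih =>
    intro c
    by_cases h : n = 0
    · subst h
      conv_lhs => rw [countZeros]
      conv_rhs => rw [countZeros]
      simp
    · have hlt : n / 10 < n := Nat.div_lt_self (Nat.pos_of_ne_zero h) (by omega)
      conv_lhs => rw [countZeros]
      conv_rhs => rw [countZeros]
      rw [if_neg h, if_neg h, ih (n / 10) hlt,
        ih (n / 10) hlt ((0 : Int) + if n % 10 = 0 then 1 else 0)]
      ring

lemma countZeros_step (n : Nat) (h : n ≠ 0) :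
    countZeros n 0 = (if n % 10 = 0 then 1 else 0) + countZeros (n / 10) 0 := by
  conv_lhs => rw [countZeros]
  rw [if_neg h, countZeros_acc]
  ring

lemma countP_rep (n : Nat) (hn : 0 < n) :
    ((rep n).countP (fun c => c = '0') : Int) = countZeros n 0 := by
  induction n using Nat.strong_induction_on with
  | _ n ih =>
    rw [countZeros_step n (by omega)]
    by_cases h10 : n < 10
    · have hm : n % 10 = n := Nat.mod_eq_of_lt h10
      have hd : n / 10 = 0 := Nat.div_eq_of_lt h10
      have hne : Nat.digitChar n ≠ '0' := by
        intro hc; exact absurd ((digitChar_eq_zero_iff n h10).mp hc) (by omega)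
      have h0 : countZeros 0 0 = 0 := by rw [countZeros]; simp
      rw [rep, dif_pos h10, hm, hd, h0, if_neg (by omega : ¬ n = 0)]
      simp [hne]
    · have hdpos : 0 < n / 10 := Nat.div_pos (by omega) (by omega)
      have hlt : n / 10 < n := Nat.div_lt_self (by omega) (by omega)
      have ihd := ih (n / 10) hlt hdpos
      have hr := digitChar_eq_zero_iff (n % 10) (Nat.mod_lt _ (by omega))
      rw [rep, dif_neg h10, List.countP_append, List.countP_singleton]
      push_cast
      rw [ihd]
      by_cases hz : n % 10 = 0
      · rw [hz, if_pos rfl, if_pos (by decide : decide (Nat.digitChar 0 = '0') = true)]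
        ring
      · rw [if_neg hz, if_neg (by simp [hr, hz])]
        ring

lemma countZeros_chunk : ∀ (k n : Nat) (c : Int), 10 ^ k ≤ n →
    countZeros n c = countZeros (n / 10 ^ k) (czFix (n % 10 ^ k) k c) := by
  intro k
  induction k with
  | zero => intro n c h; simp [czFix]
  | succ k ih =>
    intro n c h
    have h10 : (0 : Nat) < 10 ^ (k + 1) := pow_pos (by norm_num) _
    have hn0 : n ≠ 0 := by omega
    conv_lhs => rw [countZeros]
    rw [if_neg hn0]
    have hk : 10 ^ k ≤ n / 10 := by
      rw [Nat.le_div_iff_mul_le (by norm_num)]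
      calc 10 ^ k * 10 = 10 ^ (k + 1) := (pow_succ 10 k).symm
        _ ≤ n := h
    rw [ih (n / 10) _ hk]
    have e1 : n / 10 / 10 ^ k = n / 10 ^ (k + 1) := by
      rw [Nat.div_div_eq_div_mul, ← pow_succ']
    have e2 : n % 10 ^ (k + 1) / 10 = n / 10 % 10 ^ k := by
      rw [pow_succ', Nat.mod_mul_right_div_self]
    have e3 : n % 10 ^ (k + 1) % 10 = n % 10 :=
      Nat.mod_mod_of_dvd n (dvd_pow_self 10 (Nat.succ_ne_zero k))
    rw [e1, czFix, e2, e3]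

lemma bigLoop_eq (n : Nat) : ∀ c : Int, bigLoop n c = countZeros n c := by
  induction n using Nat.strong_induction_on with
  | _ n ih =>
    intro c
    rw [bigLoop.eq_def]
    by_cases h : n < 10 ^ 1800
    · rw [if_pos h]
    · have h10 : (0 : Nat) < 10 ^ 1800 := pow_pos (by norm_num) _
      rw [if_neg h,
        ih (n / 10 ^ 1800)
          (Nat.div_lt_self (by omega) (Nat.one_lt_pow (by norm_num) (by norm_num))),
        ← countZeros_chunk 1800 n c (Nat.le_of_not_lt h)]

lemma factorial_eq (num : Int) : factorial num = factorial_b num := by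
  unfold factorial factorial_b
  by_cases h : num = 0
  · subst h; decide
  · simp [h]

lemma factorial_b_pos (num : Int) : 1 ≤ factorial_b num := by
  unfold factorial_b
  have key : ∀ (xs : List Int), (∀ x ∈ xs, 1 ≤ x) → ∀ (a : Int), 1 ≤ a →
      1 ≤ xs.foldl (fun fact x => fact * x) a := by
    intro xs
    induction xs with
    | nil => intro _ a ha; simpa using ha
    | cons y ys ih =>
      intro h a ha
      simp only [List.foldl_cons]
      exact ih (fun x hx => h x (List.mem_cons_of_mem _ hx)) _
        (one_le_mul_of_one_le_of_one_le ha (h y (List.mem_cons_self)))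
  refine key _ (fun x hx => ?_) 1 le_rfl
  have := PySem.List.mem_pyRange_one.mp hx
  omega

-- ===== VERDICT (by name: the statement is the Claim_ definition above) =====
theorem num_zeros_spec : Claim_equal_num_zeros := by
  intro num _
  unfold Spec_num_zeros num_zeros num_zeros_alt
  rw [factorial_eq]
  have hpos : 1 ≤ factorial_b num := factorial_b_pos num
  have hnn : ¬ factorial_b num < 0 := by omega
  have htn : 0 < (factorial_b num).toNat := by omega
  have hfold : ∀ (cs : List Char),
      cs.foldl (fun count i => if i = '0' then count + 1 else count) (0 : Int) =
        (cs.countP (fun c => c = '0') : Int) := by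
    intro cs
    simpa using PySem.List.foldl_count_if (fun c => decide (c = '0')) cs 0
  rw [PySem.Int.toList_toStr]
  unfold PySem.Int.toChars
  rw [if_neg hnn, toDigits_eq_rep]
  show (rep (factorial_b num).toNat).foldl
      (fun count i => if i = '0' then count + 1 else count) 0 =
    bigLoop (factorial_b num).toNat 0
  rw [bigLoop_eq, hfold]
  exact countP_rep _ htn
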